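-- pv_equiv track=rewrite | github.com/cysore/tools-sslcheck | ssl_certificate_monitor/services/ssl_checker.py | _parse_issuer
-- ===== SOURCE A (Python) =====
-- def _parse_issuer(cert: dict) -> str:
--     """
--     解析证书颁发者
--
--     Args:
--         cert: SSL证书信息
--
--     Returns:
--         str: 证书颁发者
--     """
--     issuer = cert.get('issuer', [])
--
--     # 查找组织名称
--     for item in issuer:
--         if item[0][0] == 'organizationName':
--             return item[0][1]
--
--     # 如果没有找到组织名称，查找通用名称
--     for item in issuer:
--         if item[0][0] == 'commonName':
--             return item[0][1]
--
--     return "Unknown Issuer"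
-- ===== SOURCE B (Python) =====
-- def _parse_issuer(cert: dict) -> str:
--     """Single pass: return at the first organizationName; remember the first
--     commonName item and fall back to its value (or 'Unknown Issuer') after."""
--     cn_item = None
--     for item in cert.get('issuer', []):
--         name = item[0][0]
--         if name == 'organizationName':
--             return item[0][1]
--         if name == 'commonName' and cn_item is None:
--             cn_item = item
--     return cn_item[0][1] if cn_item is not None else "Unknown Issuer"
-- ===== Notes on version B (the rewrite author's own statement) =====
-- stated objective: simpler
-- what changed: B replaces A's two early-return scans over issuer with one pass that returns at the first organizationName and remembers the first commonName item, reading its value only as the fallback after the loop.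
import Mathlib
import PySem

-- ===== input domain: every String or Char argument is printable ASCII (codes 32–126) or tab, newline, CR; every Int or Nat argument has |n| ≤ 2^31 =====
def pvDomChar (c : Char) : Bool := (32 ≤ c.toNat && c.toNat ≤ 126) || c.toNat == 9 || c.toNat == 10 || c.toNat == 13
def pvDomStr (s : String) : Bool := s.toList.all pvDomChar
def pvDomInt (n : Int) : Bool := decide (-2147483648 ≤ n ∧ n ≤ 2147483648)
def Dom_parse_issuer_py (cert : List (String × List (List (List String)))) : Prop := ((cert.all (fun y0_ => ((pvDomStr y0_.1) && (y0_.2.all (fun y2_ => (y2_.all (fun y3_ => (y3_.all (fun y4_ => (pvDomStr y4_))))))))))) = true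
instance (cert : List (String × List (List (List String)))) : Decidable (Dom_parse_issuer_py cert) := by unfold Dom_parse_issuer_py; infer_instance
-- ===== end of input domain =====

-- B folds A's two early-return scans into ONE pass that returns at the first
-- organizationName and remembers the first commonName item as a pending
-- fallback (objective: simpler, same cost).

-- item[0][0] (Python IndexError modelled by the default; Pre_ keeps us in range)
def pvKeyOf (item : List (List String)) : String :=
  (PySem.List.pyGet? ((PySem.List.pyGet? item 0).getD []) 0).getD ""

-- item[0][1], same convention
def pvValOf (item : List (List String)) : String :=
  (PySem.List.pyGet? ((PySem.List.pyGet? item 0).getD []) 1).getD ""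

-- ===== PORT A =====
-- first loop: 'for item in issuer: if item[0][0] == "organizationName": return item[0][1]'
def pvA_loopOrg : List (List (List String)) → Option String
  | [] => none
  | item :: rest =>
    if pvKeyOf item = "organizationName" then some (pvValOf item) else pvA_loopOrg rest

-- second loop, for "commonName"
def pvA_loopCN : List (List (List String)) → Option String
  | [] => none
  | item :: rest =>
    if pvKeyOf item = "commonName" then some (pvValOf item) else pvA_loopCN rest

-- the body after 'issuer = cert.get('issuer', [])': two loops, then the fallback
def pvA_run (issuer : List (List (List String))) : String :=
  match pvA_loopOrg issuer with
  | some v => v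
  | none =>
    match pvA_loopCN issuer with
    | some v => v
    | none => "Unknown Issuer"

def parse_issuer_py (cert : List (String × List (List (List String)))) : String :=
  pvA_run ((PySem.Dict.mk cert).getD "issuer" [])

-- ===== PORT B =====
-- the one loop, carrying cn_item; the trailing match is the line after the loop
def pvB_loop : List (List (List String)) → Option (List (List String)) → String
  | [], cn =>
    match cn with
    | some it => pvValOf it
    | none => "Unknown Issuer"
  | item :: rest, cn =>
    if pvKeyOf item = "organizationName" then pvValOf item
    else pvB_loop rest
      (if pvKeyOf item = "commonName" ∧ cn = none then some item else cn)

def parse_issuer_py_alt (cert : List (String × List (List (List String)))) : String :=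
  pvB_loop ((PySem.Dict.mk cert).getD "issuer" []) none

-- ===== PRECONDITION & SPEC =====
-- shape checks on one issuer entry: item[0][0] readable / item[0][0]==k / item[0][1] readable
def pvOk1 : List (List String) → Bool
  | (_ :: _) :: _ => true
  | _ => false
def pvKeyIs (k : String) : List (List String) → Bool
  | (x :: _) :: _ => x == k
  | _ => false
def pvFull : List (List String) → Bool
  | (_ :: _ :: _) :: _ => true
  | _ => false

-- Pre_ admits exactly the inputs on which Python A returns (no IndexError):
-- every entry up to and including the first organizationName entry has a readable
-- item[0][0]; that entry — or, when there is none, the first commonName entry,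
-- which is the one whose value is then returned — also has an item[0][1].
def pvPreB (cert : List (String × List (List (List String)))) : Bool :=
  match ((PySem.Dict.mk cert).getD "issuer" []).find?
      (fun it => !pvOk1 it || pvKeyIs "organizationName" it) with
  | some it => pvKeyIs "organizationName" it && pvFull it
  | none =>
    match ((PySem.Dict.mk cert).getD "issuer" []).find? (pvKeyIs "commonName") with
    | some it => pvFull it
    | none => true

def Pre_parse_issuer_py (cert : List (String × List (List (List String)))) : Prop :=
  pvPreB cert = true
instance (cert : List (String × List (List (List String)))) : Decidable (Pre_parse_issuer_py cert) := by unfold Pre_parse_issuer_py; infer_instance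

def pvWitness_parse_issuer_py : (List (String × List (List (List String)))) :=
  [("issuer", [[["localityName", "Springfield"]], [["commonName", "acme.com"]], [["organizationName", "Acme"]]])]

def Spec_parse_issuer_py (cert : List (String × List (List (List String)))) (out : String) : Prop := out = parse_issuer_py_alt cert
instance (cert : List (String × List (List (List String)))) (out : String) : Decidable (Spec_parse_issuer_py cert out) := by unfold Spec_parse_issuer_py; infer_instance

-- ===== CLAIM (what is proved, stated in full; the proofs are below) =====
def Claim_equal_parse_issuer_py : Prop := ∀ (cert : List (String × List (List (List String)))), Dom_parse_issuer_py cert → Pre_parse_issuer_py cert → Spec_parse_issuer_py cert (parse_issuer_py cert)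

-- ===== LEMMAS AND PROOFS =====

-- loop invariant: B's single pass equals "first org value, else pending cn, else A's cn scan"
theorem pvB_loop_eq (l : List (List (List String))) (cn : Option (List (List String))) :
    pvB_loop l cn =
      match pvA_loopOrg l with
      | some v => v
      | none =>
        match cn with
        | some it => pvValOf it
        | none => (pvA_loopCN l).getD "Unknown Issuer" := by
  induction l generalizing cn with
  | nil => cases cn <;> rfl
  | cons item rest ih =>
    by_cases ho : pvKeyOf item = "organizationName"
    · simp [pvB_loop, pvA_loopOrg, ho]
    · cases cn with
      | some it =>
        simp [pvB_loop, pvA_loopOrg, ho, ih]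
      | none =>
        by_cases hc : pvKeyOf item = "commonName"
        · simp [pvB_loop, pvA_loopOrg, pvA_loopCN, ho, hc, ih]
        · simp [pvB_loop, pvA_loopOrg, pvA_loopCN, ho, hc, ih]

-- ===== VERDICT (by name: the statement is the Claim_ definition above) =====
theorem parse_issuer_py_spec : Claim_equal_parse_issuer_py := by
  intro cert _ _
  unfold Spec_parse_issuer_py parse_issuer_py parse_issuer_py_alt pvA_run
  rw [pvB_loop_eq]
  cases pvA_loopOrg ((PySem.Dict.mk cert).getD "issuer" []) with
  | none => cases pvA_loopCN ((PySem.Dict.mk cert).getD "issuer" []) <;> rfl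
  | some v => rfl
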